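-- pv_equiv track=rewrite | github.com/KenBPayne/kit-app-jump-sim | source/extensions/omni.docs.vehicle.helper/omni/docs/vehicle/helper/vehicle_definition.py | make_physx_wheel_ref_list
-- ===== SOURCE A (Python) =====
-- def make_physx_wheel_ref_list(phys_veh_path, wheel_count):
--     is_left = True
--     axle_num = 1
--     wheel_list = []
--     for wr_num in range(wheel_count):
--         wheel_ref_name = "/LeftWheel" if is_left else "/RightWheel"
--         wheel_ref_name = wheel_ref_name + str(axle_num) + "References"
--         ref_path = phys_veh_path + wheel_ref_name
--         wheel_list.append(ref_path)
--         # cue up next wheel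
--         is_left = not is_left
--         if is_left:
--             axle_num += 1
--
--     return wheel_list
-- ===== SOURCE B (Python) =====
-- def make_physx_wheel_ref_list(phys_veh_path, wheel_count):
--     # Stage 1: emit a full Left/Right pair per axle (ceil(n/2) axles),
--     # Stage 2: truncate to the requested wheel count.
--     axles = (wheel_count + 1) // 2 if wheel_count > 0 else 0
--     pairs = []
--     for axle in range(1, axles + 1):
--         for side in ("/LeftWheel", "/RightWheel"):
--             pairs.append(phys_veh_path + side + str(axle) + "References")
--     return pairs[:wheel_count]
-- ===== Notes on version B (the rewrite author's own statement) =====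
-- stated objective: alternative
-- what changed: Replaced the per-wheel loop threading a left/right toggle and a conditionally incremented axle counter with a staged axle-wise construction: emit a complete Left/Right pair for each of ceil(n/2) axles, then truncate the pair list to the requested wheel count.
import Mathlib
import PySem

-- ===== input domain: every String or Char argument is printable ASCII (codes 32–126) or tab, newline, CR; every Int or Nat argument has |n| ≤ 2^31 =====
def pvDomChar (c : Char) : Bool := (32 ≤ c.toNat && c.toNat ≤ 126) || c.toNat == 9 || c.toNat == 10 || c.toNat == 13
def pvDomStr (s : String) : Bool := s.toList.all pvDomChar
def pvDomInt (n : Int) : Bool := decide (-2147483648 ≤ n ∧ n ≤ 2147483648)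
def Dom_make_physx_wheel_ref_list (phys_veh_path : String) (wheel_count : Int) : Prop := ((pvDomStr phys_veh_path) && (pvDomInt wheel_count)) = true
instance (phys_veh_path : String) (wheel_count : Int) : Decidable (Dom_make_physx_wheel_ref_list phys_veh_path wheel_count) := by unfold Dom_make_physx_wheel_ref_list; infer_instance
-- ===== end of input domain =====

-- B replaces A's per-wheel loop (threaded is_left toggle / conditionally incremented axle counter)
-- with a staged construction: one Left/Right pair per axle for ceil(n/2) axles, then truncate to n (objective: alternative).


-- ===== PORT A =====
-- state: (is_left, axle_num, wheel_list); one fold step per loop iteration, in A's statement order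
def pvStepA (phys_veh_path : String) (st : Bool × Int × List String) (_wr_num : Int) :
    Bool × Int × List String :=
  let wheel_ref_name := if st.1 then "/LeftWheel" else "/RightWheel"
  let wheel_ref_name := wheel_ref_name ++ PySem.Int.toStr st.2.1 ++ "References"
  let ref_path := phys_veh_path ++ wheel_ref_name
  let wheel_list := st.2.2 ++ [ref_path]
  let is_left := !st.1
  let axle_num := if is_left then st.2.1 + 1 else st.2.1
  (is_left, axle_num, wheel_list)

def make_physx_wheel_ref_list (phys_veh_path : String) (wheel_count : Int) : List String :=
  ((PySem.List.pyRange 0 wheel_count 1).foldl (pvStepA phys_veh_path) (true, 1, [])).2.2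

-- ===== PORT B =====
-- inner 'for side in (...)' loop of Source B: append both wheels of one axle
def pvAxlePair (phys_veh_path : String) (pairs : List String) (axle : Int) : List String :=
  ["/LeftWheel", "/RightWheel"].foldl
    (fun acc side => acc ++ [phys_veh_path ++ side ++ PySem.Int.toStr axle ++ "References"]) pairs

def make_physx_wheel_ref_list_alt (phys_veh_path : String) (wheel_count : Int) : List String :=
  let axles : Int := if wheel_count > 0 then PySem.Int.floordiv (wheel_count + 1) 2 else 0
  let pairs := (PySem.List.pyRange 1 (axles + 1) 1).foldl (pvAxlePair phys_veh_path) []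
  PySem.List.slice pairs none (some wheel_count)

-- ===== PRECONDITION & SPEC =====
def Spec_make_physx_wheel_ref_list (phys_veh_path : String) (wheel_count : Int) (out : List String) : Prop := out = make_physx_wheel_ref_list_alt phys_veh_path wheel_count
instance (phys_veh_path : String) (wheel_count : Int) (out : List String) : Decidable (Spec_make_physx_wheel_ref_list phys_veh_path wheel_count out) := by unfold Spec_make_physx_wheel_ref_list; infer_instance

-- ===== CLAIM (what is proved, stated in full; the proofs are below) =====
def Claim_equal_make_physx_wheel_ref_list : Prop := ∀ (phys_veh_path : String) (wheel_count : Int), Dom_make_physx_wheel_ref_list phys_veh_path wheel_count → Spec_make_physx_wheel_ref_list phys_veh_path wheel_count (make_physx_wheel_ref_list phys_veh_path wheel_count)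

-- ===== LEMMAS AND PROOFS =====

-- the i-th wheel path, as a closed form of the index (proof vocabulary only)
def pvElemN (p : String) (i : Nat) : String :=
  p ++ (if i % 2 = 0 then "/LeftWheel" else "/RightWheel")
    ++ PySem.Int.toStr ((i / 2 + 1 : Nat) : Int) ++ "References"

-- A's loop invariant: after m iterations the state is (parity of m, m/2 + 1, first m elements)
lemma pvLoopA (p : String) (m : Nat) :
    (PySem.List.pyRange 0 m 1).foldl (pvStepA p) (true, 1, []) =
      (decide (m % 2 = 0), ((m / 2 : Nat) : Int) + 1,
        (List.range m).map (pvElemN p)) := by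
  induction m with
  | zero => simp [PySem.List.pyRange_one_eq_nil]
  | succ m ih =>
      have hcast : ((m + 1 : Nat) : Int) = (m : Int) + 1 := by push_cast; ring
      have hsplit := PySem.List.pyRange_one_succ_right (a := 0) (b := (m : Int)) (by positivity)
      rw [hcast, hsplit, List.foldl_append, ih, List.range_succ, List.map_append]
      rcases Nat.even_or_odd m with he | ho
      · have h0 : m % 2 = 0 := Nat.even_iff.mp he
        have h1 : (m + 1) % 2 = 1 := by omega
        have h2 : (m + 1) / 2 = m / 2 := by omega
        simp [pvStepA, pvElemN, List.foldl, h0, h1, h2, String.append_assoc]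
      · have h0 : m % 2 = 1 := Nat.odd_iff.mp ho
        have h1 : (m + 1) % 2 = 0 := by omega
        have h2 : (m + 1) / 2 = m / 2 + 1 := by omega
        have hc : ((m / 2 : Nat) : Int) + 1 + 1 = ((m / 2 + 1 + 1 : Nat) : Int) := by push_cast; ring
        simp [pvStepA, pvElemN, List.foldl, h0, h1, h2, String.append_assoc]

-- B's axle loop: k full axles produce exactly the first 2k wheel paths
lemma pvLoopB (p : String) (k : Nat) :
    (PySem.List.pyRange 1 ((k : Int) + 1) 1).foldl (pvAxlePair p) [] =
      (List.range (2 * k)).map (pvElemN p) := by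
  induction k with
  | zero => simp [PySem.List.pyRange_one_eq_nil]
  | succ k ih =>
      have hcast : (((k + 1 : Nat) : Int) + 1) = ((k : Int) + 1) + 1 := by push_cast; ring
      have hsplit := PySem.List.pyRange_one_succ_right (a := 1) (b := (k : Int) + 1) (by omega)
      rw [hcast, hsplit, List.foldl_append, ih]
      have h2 : 2 * (k + 1) = (2 * k + 1) + 1 := by ring
      rw [h2, List.range_succ, List.range_succ, List.map_append, List.map_append]
      have hL : (2 * k) % 2 = 0 := by omega
      have hR : (2 * k + 1) % 2 = 1 := by omega
      have hdL : 2 * k / 2 + 1 = k + 1 := by omega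
      have hdR : (2 * k + 1) / 2 + 1 = k + 1 := by omega
      simp [pvAxlePair, List.foldl, pvElemN, hL, hR, hdR, String.append_assoc]

-- ===== VERDICT (by name: the statement is the Claim_ definition above) =====
theorem make_physx_wheel_ref_list_spec : Claim_equal_make_physx_wheel_ref_list := by
  intro p n _
  show _ = _
  unfold make_physx_wheel_ref_list make_physx_wheel_ref_list_alt
  by_cases hn : n > 0
  · have hm : n = (n.toNat : Int) := (Int.toNat_of_nonneg (by omega)).symm
    have haxles : PySem.Int.floordiv (n + 1) 2 = (((n.toNat + 1) / 2 : Nat) : Int) := by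
      rw [show n + 1 = ((n.toNat + 1 : Nat) : Int) by omega]
      exact_mod_cast PySem.Int.floordiv_natCast (n.toNat + 1) 2
    simp only [hn, if_pos]
    rw [haxles, pvLoopB p ((n.toNat + 1) / 2)]
    rw [hm, pvLoopA p n.toNat, PySem.List.slice_to_natCast]
    rw [← List.map_take, List.take_range]
    simp only [Int.toNat_natCast]
    have : min n.toNat (2 * ((n.toNat + 1) / 2)) = n.toNat := by omega
    rw [this]
  · have h1 : PySem.List.pyRange 0 n 1 = [] := PySem.List.pyRange_one_eq_nil (by omega)
    simp only [hn, if_neg, not_false_iff]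
    rw [h1, PySem.List.pyRange_one_eq_nil (by omega)]
    simp [PySem.List.slice]
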